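-- pv_equiv track=rewrite | github.com/kasi-x/animator_eval | src/etl/normalize/column_rules.py | pick_info_richest_from_set
-- ===== SOURCE A (Python) =====
-- def _case_richness_score(s: str) -> int:
--     """Return a numeric score reflecting 'information richness' of case pattern.
--
--     Higher score = more informative:
--         mixed-case = 2  (both upper and lower present)
--         all-lower  = 1
--         all-upper  = 0
--     """
--     has_upper = any(ch.isupper() for ch in s)
--     has_lower = any(ch.islower() for ch in s)
--     if has_upper and has_lower:
--         return 2
--     if has_lower:
--         return 1
--     return 0
--
-- def pick_info_richest_from_set(values: list[str]) -> str:
--     """From a list of string values, pick the one with the most case 'richness'.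
--
--     Used for the info_richest and info_richest_punct_clean rule types when
--     multiple source values need to be compared for the preferred canonical form.
--
--     Tie-breaking: lexicographic order on the original string (deterministic).
--
--     Args:
--         values: Non-empty list of candidate strings.
--
--     Returns:
--         The string with the highest case-richness score.
--     """
--     if not values:
--         raise ValueError("pick_info_richest_from_set requires a non-empty list")
--     if len(values) == 1:
--         return values[0]
--
--     scored = [(s, _case_richness_score(s)) for s in values]
--     best_score = max(sc for _, sc in scored)
--     candidates = [s for s, sc in scored if sc == best_score]
--     # Deterministic tie-break: lexicographic descending (prefer "Studio Ghibli" over "studio ghibli")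
--     return sorted(candidates)[-1]
-- ===== SOURCE B (Python) =====
-- def _case_richness_score(s: str) -> int:
--     has_upper = any(ch.isupper() for ch in s)
--     has_lower = any(ch.islower() for ch in s)
--     if has_upper and has_lower:
--         return 2
--     if has_lower:
--         return 1
--     return 0
--
-- def pick_info_richest_from_set(values: list[str]) -> str:
--     if not values:
--         raise ValueError("pick_info_richest_from_set requires a non-empty list")
--     return max(values, key=lambda s: (_case_richness_score(s), s))
-- ===== Notes on version B (the rewrite author's own statement) =====
-- stated objective: simpler
-- what changed: Replaces the scored-list / best-score / candidate-filter / sort pipeline with a single keyed max scan: max(values, key=lambda s: (_case_richness_score(s), s)); no intermediate lists and no sorting.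
import Mathlib
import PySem

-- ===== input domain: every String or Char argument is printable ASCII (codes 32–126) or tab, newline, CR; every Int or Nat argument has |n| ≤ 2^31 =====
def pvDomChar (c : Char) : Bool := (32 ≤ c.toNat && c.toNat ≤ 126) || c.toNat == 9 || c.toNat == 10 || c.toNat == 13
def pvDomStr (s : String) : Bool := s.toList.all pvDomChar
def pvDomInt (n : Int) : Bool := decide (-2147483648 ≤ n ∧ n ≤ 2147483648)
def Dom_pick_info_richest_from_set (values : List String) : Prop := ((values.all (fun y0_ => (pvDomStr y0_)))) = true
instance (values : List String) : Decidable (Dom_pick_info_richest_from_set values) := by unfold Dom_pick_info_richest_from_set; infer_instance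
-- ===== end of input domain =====

-- B collapses A's scored-list / best-score / candidate-filter / sort pipeline into one
-- keyed max scan (max with key (score, s)); same result, simpler one-pass structure.


-- ===== PORT A =====
-- helper _case_richness_score (shared verbatim by A and B in the Python sources)
def case_richness_score (s : String) : Int :=
  let has_upper := s.toList.any PySem.Chars.isupper
  let has_lower := s.toList.any PySem.Chars.islower
  if has_upper && has_lower then 2
  else if has_lower then 1
  else 0

def pick_info_richest_from_set (values : List String) : String :=
  if values = [] then ""   -- Python raises ValueError here; excluded by Pre_
  else if values.length = 1 then (PySem.List.pyGet? values 0).getD ""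
  else
    let scored := values.map (fun s => (s, case_richness_score s))
    let best_score := (PySem.List.max? (scored.map (fun p => p.2)) (fun x => x)).getD 0
    let candidates := (scored.filter (fun p => p.2 == best_score)).map (fun p => p.1)
    match PySem.List.pyGet? (PySem.List.sorted candidates (fun x => x) false) (-1) with
    | some s => s
    | none => ""             -- unreachable: candidates is non-empty

-- ===== PORT B =====
def pick_info_richest_from_set_alt (values : List String) : String :=
  if values = [] then ""   -- Python raises ValueError here; excluded by Pre_
  else
    match PySem.List.max2? values (fun s => case_richness_score s) (fun s => s) with
    | some m => m
    | none => ""             -- unreachable: values is non-empty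

-- ===== PRECONDITION & SPEC =====
-- Pre_ excludes only the empty list, on which both Pythons raise ValueError.
def Pre_pick_info_richest_from_set (values : List String) : Prop := values ≠ []
instance (values : List String) : Decidable (Pre_pick_info_richest_from_set values) := by unfold Pre_pick_info_richest_from_set; infer_instance
def pvWitness_pick_info_richest_from_set : List String := ["Ab", "ab", "AB"]

def Spec_pick_info_richest_from_set (values : List String) (out : String) : Prop := out = pick_info_richest_from_set_alt values
instance (values : List String) (out : String) : Decidable (Spec_pick_info_richest_from_set values out) := by unfold Spec_pick_info_richest_from_set; infer_instance

-- ===== CLAIM (what is proved, stated in full; the proofs are below) =====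
def Claim_equal_pick_info_richest_from_set : Prop := ∀ (values : List String), Dom_pick_info_richest_from_set values → Pre_pick_info_richest_from_set values → Spec_pick_info_richest_from_set values (pick_info_richest_from_set values)

-- ===== LEMMAS AND PROOFS =====

-- kle a b : the key (score a, a) is ≤ (score b, b) in Python's tuple (lexicographic) order
def kle (a b : String) : Prop :=
  case_richness_score a < case_richness_score b ∨
    (case_richness_score a = case_richness_score b ∧ a ≤ b)

theorem kle_refl (a : String) : kle a a := Or.inr ⟨rfl, le_refl a⟩

theorem kle_trans {a b c : String} (h1 : kle a b) (h2 : kle b c) : kle a c := by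
  rcases h1 with h1 | ⟨h1, h1'⟩ <;> rcases h2 with h2 | ⟨h2, h2'⟩
  · exact Or.inl (lt_trans h1 h2)
  · exact Or.inl (by omega)
  · exact Or.inl (by omega)
  · exact Or.inr ⟨by omega, le_trans h1' h2'⟩

theorem kle_antisymm {a b : String} (h1 : kle a b) (h2 : kle b a) : a = b := by
  rcases h1 with h1 | ⟨h1, h1'⟩ <;> rcases h2 with h2 | ⟨h2, h2'⟩
  · omega
  · omega
  · omega
  · exact le_antisymm h1' h2'

-- the strict comparison max2?'s step performs, as a Prop
def kcond (m x : String) : Prop :=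
  case_richness_score m < case_richness_score x ∨
    (¬ case_richness_score x < case_richness_score m ∧ m < x)

theorem kcond_imp_kle {m x : String} (h : kcond m x) : kle m x := by
  rcases h with h | ⟨h, h'⟩
  · exact Or.inl h
  · by_cases hs : case_richness_score m < case_richness_score x
    · exact Or.inl hs
    · exact Or.inr ⟨by omega, le_of_lt h'⟩

theorem not_kcond_imp_kle {m x : String} (h : ¬ kcond m x) : kle x m := by
  by_cases hs : case_richness_score x < case_richness_score m
  · exact Or.inl hs
  · have h1 : ¬ case_richness_score m < case_richness_score x := fun hl => h (Or.inl hl)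
    have h2 : ¬ m < x := fun hl => h (Or.inr ⟨hs, hl⟩)
    exact Or.inr ⟨by omega, not_lt.mp h2⟩

-- max2?'s step as a named function, to state the fold invariant
def kstep (acc : Option String) (x : String) : Option String :=
  match acc with
  | none => some x
  | some m =>
      if (decide (case_richness_score m < case_richness_score x) ||
          (!decide (case_richness_score x < case_richness_score m) && decide (m < x))) = true
      then some x else some m

theorem kstep_some_pos {m x : String} (h : kcond m x) : kstep (some m) x = some x := by
  have hb : (decide (case_richness_score m < case_richness_score x) ||
      (!decide (case_richness_score x < case_richness_score m) && decide (m < x))) = true := by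
    rcases h with h | ⟨h1, h2⟩
    · simp [h]
    · simp [h1, h2]
  show (if (decide (case_richness_score m < case_richness_score x) ||
      (!decide (case_richness_score x < case_richness_score m) && decide (m < x))) = true
    then some x else some m) = some x
  rw [if_pos hb]

theorem kstep_some_neg {m x : String} (h : ¬ kcond m x) : kstep (some m) x = some m := by
  have hb : (decide (case_richness_score m < case_richness_score x) ||
      (!decide (case_richness_score x < case_richness_score m) && decide (m < x))) = false := by
    have hA : ¬ case_richness_score m < case_richness_score x := fun hl => h (Or.inl hl)
    by_cases hB : case_richness_score x < case_richness_score m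
    · simp [hA, hB]
    · have hC : ¬ m < x := fun hl => h (Or.inr ⟨hB, hl⟩)
      simp [hA, hB, hC]
  show (if (decide (case_richness_score m < case_richness_score x) ||
      (!decide (case_richness_score x < case_richness_score m) && decide (m < x))) = true
    then some x else some m) = some m
  rw [if_neg (by simp only [hb]; decide)]

theorem foldl_kstep_spec (vs : List String) (v : String) :
    ∃ r, List.foldl kstep (some v) vs = some r ∧ r ∈ v :: vs ∧ kle v r ∧
      ∀ x ∈ vs, kle x r := by
  induction vs generalizing v with
  | nil => exact ⟨v, rfl, List.mem_singleton.mpr rfl, kle_refl v, by simp⟩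
  | cons x t ih =>
    rw [List.foldl_cons]
    by_cases hc : kcond v x
    · rw [kstep_some_pos hc]
      obtain ⟨r, hr, hmem, hxr, hall⟩ := ih x
      refine ⟨r, hr, ?_, kle_trans (kcond_imp_kle hc) hxr, ?_⟩
      · rcases List.mem_cons.mp hmem with h | h
        · simp [h]
        · simp [h]
      · intro y hy
        rcases List.mem_cons.mp hy with h | h
        · exact h ▸ hxr
        · exact hall y h
    · rw [kstep_some_neg hc]
      obtain ⟨r, hr, hmem, hvr, hall⟩ := ih v
      refine ⟨r, hr, ?_, hvr, ?_⟩
      · rcases List.mem_cons.mp hmem with h | h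
        · simp [h]
        · simp [h]
      · intro y hy
        rcases List.mem_cons.mp hy with h | h
        · exact h ▸ kle_trans (not_kcond_imp_kle hc) hvr
        · exact hall y h

theorem max2_spec (v : String) (vs : List String) :
    ∃ r, PySem.List.max2? (v :: vs) (fun s => case_richness_score s) (fun s => s) = some r ∧
      r ∈ v :: vs ∧ ∀ x ∈ v :: vs, kle x r := by
  obtain ⟨r, hr, hmem, hvr, hall⟩ := foldl_kstep_spec vs v
  have hdef : PySem.List.max2? (v :: vs) (fun s => case_richness_score s) (fun s => s) =
      List.foldl kstep (some v) vs := by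
    unfold PySem.List.max2?
    rw [List.foldl_cons]
    congr 1
    funext acc x
    cases acc <;> rfl
  refine ⟨r, ?_, hmem, ?_⟩
  · rw [hdef]; exact hr
  · intro x hx
    rcases List.mem_cons.mp hx with h | h
    · exact h ▸ hvr
    · exact hall x h

theorem alt_spec (values : List String) (h : values ≠ []) :
    pick_info_richest_from_set_alt values ∈ values ∧
      ∀ x ∈ values, kle x (pick_info_richest_from_set_alt values) := by
  obtain ⟨v, vs, rfl⟩ := List.exists_cons_of_ne_nil h
  obtain ⟨r, hr, hmem, hall⟩ := max2_spec v vs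
  unfold pick_info_richest_from_set_alt
  rw [if_neg h, hr]
  exact ⟨hmem, hall⟩

-- last element of a ≤-sorted list bounds every element
theorem pairwise_getLast?_max {l : List String} {m : String}
    (hp : l.Pairwise (fun a b => a ≤ b)) (hm : l.getLast? = some m) :
    ∀ x ∈ l, x ≤ m := by
  induction l with
  | nil => simp at hm
  | cons a t ih =>
    cases t with
    | nil =>
      simp at hm
      intro x hx
      simp at hx
      simp [hx, hm]
    | cons b u =>
      rw [List.getLast?_cons_cons] at hm
      have hp' := List.pairwise_cons.mp hp
      have ht := ih hp'.2 hm
      intro x hx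
      rcases List.mem_cons.mp hx with h | h
      · have hmmem : m ∈ b :: u := List.mem_of_getLast? hm
        exact h ▸ le_trans (hp'.1 m hmmem) (le_refl m)
      · exact ht x h

theorem a_spec (values : List String) (h : values ≠ []) :
    pick_info_richest_from_set values ∈ values ∧
      ∀ x ∈ values, kle x (pick_info_richest_from_set values) := by
  unfold pick_info_richest_from_set
  rw [if_neg h]
  by_cases h1 : values.length = 1
  · rw [if_pos h1]
    obtain ⟨v, hv⟩ := List.length_eq_one_iff.mp h1
    subst hv
    simp [PySem.List.pyGet?, PySem.List.pyIdx?, kle_refl]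
  · rw [if_neg h1]
    -- the map-of-snd over scored is the list of scores
    have hscores : (values.map (fun s => (s, case_richness_score s))).map
        (fun p => p.2) = values.map case_richness_score := by
      simp [List.map_map]
    simp only [hscores]
    -- max? of the (non-empty) score list
    obtain ⟨b, hb⟩ : ∃ b, PySem.List.max? (values.map case_richness_score)
        (fun x => x) = some b := by
      rcases hmx : PySem.List.max? (values.map case_richness_score) (fun x => x) with _ | b
      · exact absurd (by simpa using (PySem.List.max?_eq_none_iff _ _).mp hmx) h
      · exact ⟨b, rfl⟩
    have hbmem : b ∈ values.map case_richness_score := PySem.List.max?_mem hb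
    have hbmax : ∀ y ∈ values.map case_richness_score, y ≤ b := by
      intro y hy
      exact PySem.List.max?_isMax hb y hy
    rw [hb]
    simp only [Option.getD_some]
    -- candidates = values filtered to the best score
    have hcand : ((values.map (fun s => (s, case_richness_score s))).filter
          (fun p => p.2 == b)).map (fun p => p.1) =
        values.filter (fun s => case_richness_score s == b) := by
      rw [List.filter_map, List.map_map]
      simp [Function.comp_def]
    rw [hcand]
    set cs := values.filter (fun s => case_richness_score s == b) with hcs
    have hcsne : cs ≠ [] := by
      obtain ⟨s, hsmem, hsb⟩ := List.mem_map.mp hbmem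
      intro hnil
      have : s ∈ cs := List.mem_filter.mpr ⟨hsmem, by simp [hsb]⟩
      simp [hnil] at this
    have hLne : PySem.List.sorted cs (fun x => x) false ≠ [] := by
      intro hnil
      exact hcsne ((PySem.List.sorted_eq_nil_iff _ _ _).mp hnil)
    obtain ⟨m, hm⟩ : ∃ m, (PySem.List.sorted cs (fun x => x) false).getLast? = some m := by
      rcases hL : (PySem.List.sorted cs (fun x => x) false).getLast? with _ | m
      · exact absurd (List.getLast?_eq_none_iff.mp hL) hLne
      · exact ⟨m, rfl⟩
    rw [PySem.List.pyGet?_neg_one, hm]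
    show m ∈ values ∧ ∀ x ∈ values, kle x m
    have hpair : (PySem.List.sorted cs (fun x => x) false).Pairwise (fun a c => a ≤ c) := by
      simpa using PySem.List.sorted_pairwise cs (fun x => x)
    have hmax := pairwise_getLast?_max hpair hm
    have hmmemL : m ∈ PySem.List.sorted cs (fun x => x) false := List.mem_of_getLast? hm
    have hmcs : m ∈ cs := (PySem.List.mem_sorted _ _ _ _).mp hmmemL
    have hmval : m ∈ values := (List.mem_filter.mp hmcs).1
    have hmb : case_richness_score m = b := by
      have := (List.mem_filter.mp hmcs).2
      simpa using this
    refine ⟨hmval, ?_⟩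
    intro x hx
    have hxb : case_richness_score x ≤ b :=
      hbmax _ (List.mem_map.mpr ⟨x, hx, rfl⟩)
    by_cases hxe : case_richness_score x = b
    · have hxcs : x ∈ cs := List.mem_filter.mpr ⟨hx, by simp [hxe]⟩
      have hxL : x ∈ PySem.List.sorted cs (fun x => x) false :=
        (PySem.List.mem_sorted _ _ _ _).mpr hxcs
      exact Or.inr ⟨by omega, hmax x hxL⟩
    · exact Or.inl (by omega)

-- ===== VERDICT (by name: the statement is the Claim_ definition above) =====
theorem pick_info_richest_from_set_spec : Claim_equal_pick_info_richest_from_set := by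
  intro values _ hpre
  obtain ⟨haMem, haMax⟩ := a_spec values hpre
  obtain ⟨hbMem, hbMax⟩ := alt_spec values hpre
  unfold Spec_pick_info_richest_from_set
  exact kle_antisymm (hbMax _ haMem) (haMax _ hbMem)
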